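-- pv_equiv track=rewrite | github.com/pallavimore13/Python-Lab | cal.py | calculate_day_of_week
-- ===== SOURCE A (Python) =====
-- def calculate_day_of_week(year, month):
--     day = (year - 1) % 400
--     day = (day // 100) * 5 + ((day % 100) - (day % 100) // 4) + ((day % 100) // 4) * 2
--     day = day % 7
--
--     nly = [31, 28, 31, 30, 31, 30, 31, 31, 30, 31, 30, 31]
--     ly = [31, 29, 31, 30, 31, 30, 31, 31, 30, 31, 30, 31]
--     s = 0
--
--     if year % 4 == 0:
--         for i in range(month - 1):
--             s += ly[i]
--     else:
--         for i in range(month - 1):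
--             s += nly[i]
--
--     day += s % 7
--     return day % 7
-- ===== SOURCE B (Python) =====
-- # B: replace the month-summing loops with two precomputed cumulative prefix-sum tables.
-- _NLY_PREFIX = [0, 31, 59, 90, 120, 151, 181, 212, 243, 273, 304, 334, 365]
-- _LY_PREFIX  = [0, 31, 60, 91, 121, 152, 182, 213, 244, 274, 305, 335, 366]
--
-- def calculate_day_of_week(year, month):
--     day = (year - 1) % 400
--     day = (day // 100) * 5 + ((day % 100) - (day % 100) // 4) + ((day % 100) // 4) * 2
--     day = day % 7
--     table = _LY_PREFIX if year % 4 == 0 else _NLY_PREFIX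
--     s = 0 if month < 1 else table[month - 1]
--     return (day + s % 7) % 7
-- ===== Notes on version B (the rewrite author's own statement) =====
-- stated objective: simpler
-- what changed: The per-month summing loop over the month-length lists is replaced by a single indexed lookup into two precomputed cumulative prefix-sum tables.
import Mathlib
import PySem

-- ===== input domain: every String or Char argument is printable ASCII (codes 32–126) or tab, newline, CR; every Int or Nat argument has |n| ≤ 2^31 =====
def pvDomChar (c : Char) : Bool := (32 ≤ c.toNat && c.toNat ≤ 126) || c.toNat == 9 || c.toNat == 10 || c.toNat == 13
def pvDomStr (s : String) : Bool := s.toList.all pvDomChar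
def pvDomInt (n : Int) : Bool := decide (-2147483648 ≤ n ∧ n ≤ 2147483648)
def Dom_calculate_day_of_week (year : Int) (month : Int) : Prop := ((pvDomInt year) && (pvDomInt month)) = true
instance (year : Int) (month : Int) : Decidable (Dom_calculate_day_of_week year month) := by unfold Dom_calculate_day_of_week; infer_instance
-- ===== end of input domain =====

-- B replaces A's month-summing loop by a single lookup into precomputed prefix-sum tables (simpler).


-- ===== PORT A =====
def calculate_day_of_week (year : Int) (month : Int) : Int :=
  let day := PySem.Int.mod (year - 1) 400
  let day := (PySem.Int.floordiv day 100) * 5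
      + ((PySem.Int.mod day 100) - PySem.Int.floordiv (PySem.Int.mod day 100) 4)
      + (PySem.Int.floordiv (PySem.Int.mod day 100) 4) * 2
  let day := PySem.Int.mod day 7
  let nly : List Int := [31, 28, 31, 30, 31, 30, 31, 31, 30, 31, 30, 31]
  let ly : List Int := [31, 29, 31, 30, 31, 30, 31, 31, 30, 31, 30, 31]
  let s : Int := 0
  -- ly[i]/nly[i]: in-range under Pre_ (month ≤ 13); Python raises IndexError outside
  let s := if PySem.Int.mod year 4 = 0 then
      (PySem.List.pyRange 0 (month - 1) 1).foldl (fun s i => s + PySem.List.pyGetD ly i 0) s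
    else
      (PySem.List.pyRange 0 (month - 1) 1).foldl (fun s i => s + PySem.List.pyGetD nly i 0) s
  let day := day + PySem.Int.mod s 7
  PySem.Int.mod day 7

-- ===== PORT B =====
def nlyPrefix : List Int := [0, 31, 59, 90, 120, 151, 181, 212, 243, 273, 304, 334, 365]
def lyPrefix : List Int := [0, 31, 60, 91, 121, 152, 182, 213, 244, 274, 305, 335, 366]

def calculate_day_of_week_alt (year : Int) (month : Int) : Int :=
  let day := PySem.Int.mod (year - 1) 400
  let day := (PySem.Int.floordiv day 100) * 5
      + ((PySem.Int.mod day 100) - PySem.Int.floordiv (PySem.Int.mod day 100) 4)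
      + (PySem.Int.floordiv (PySem.Int.mod day 100) 4) * 2
  let day := PySem.Int.mod day 7
  let table := if PySem.Int.mod year 4 = 0 then lyPrefix else nlyPrefix
  -- table[month - 1]: in-range under Pre_ (month ≤ 13); Python raises IndexError outside
  let s : Int := if month < 1 then 0 else PySem.List.pyGetD table (month - 1) 0
  PySem.Int.mod (day + PySem.Int.mod s 7) 7

-- ===== PRECONDITION & SPEC =====
-- A raises IndexError for month ≥ 14 (it indexes past the 12-entry month lists); excluded.
def Pre_calculate_day_of_week (year : Int) (month : Int) : Prop := month ≤ 13
instance (year : Int) (month : Int) : Decidable (Pre_calculate_day_of_week year month) := by unfold Pre_calculate_day_of_week; infer_instance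
def pvWitness_calculate_day_of_week : Int × Int := (2024, 7)

def Spec_calculate_day_of_week (year : Int) (month : Int) (out : Int) : Prop := out = calculate_day_of_week_alt year month
instance (year : Int) (month : Int) (out : Int) : Decidable (Spec_calculate_day_of_week year month out) := by unfold Spec_calculate_day_of_week; infer_instance

-- ===== CLAIM (what is proved, stated in full; the proofs are below) =====
def Claim_equal_calculate_day_of_week : Prop := ∀ (year : Int) (month : Int), Dom_calculate_day_of_week year month → Pre_calculate_day_of_week year month → Spec_calculate_day_of_week year month (calculate_day_of_week year month)

-- ===== LEMMAS AND PROOFS =====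

-- the empty-range case: for month < 1 both sides take s = 0
theorem pyRange_nonpos_nil (b : Int) (hb : b ≤ 0) : PySem.List.pyRange 0 b 1 = [] := by
  simp [PySem.List.pyRange]; omega

-- A's loop sum equals B's prefix-table entry, for each list, on 1 ≤ month ≤ 13
theorem loop_eq_prefix_ly (month : Int) (h1 : 1 ≤ month) (h2 : month ≤ 13) :
    (PySem.List.pyRange 0 (month - 1) 1).foldl
      (fun s i => s + PySem.List.pyGetD ([31, 29, 31, 30, 31, 30, 31, 31, 30, 31, 30, 31] : List Int) i 0) 0
      = PySem.List.pyGetD lyPrefix (month - 1) 0 := by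
  interval_cases month <;> decide

theorem loop_eq_prefix_nly (month : Int) (h1 : 1 ≤ month) (h2 : month ≤ 13) :
    (PySem.List.pyRange 0 (month - 1) 1).foldl
      (fun s i => s + PySem.List.pyGetD ([31, 28, 31, 30, 31, 30, 31, 31, 30, 31, 30, 31] : List Int) i 0) 0
      = PySem.List.pyGetD nlyPrefix (month - 1) 0 := by
  interval_cases month <;> decide

-- ===== VERDICT (by name: the statement is the Claim_ definition above) =====
theorem calculate_day_of_week_spec : Claim_equal_calculate_day_of_week := by
  intro year month _ hpre
  unfold Spec_calculate_day_of_week calculate_day_of_week calculate_day_of_week_alt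
  by_cases hm : month < 1
  · simp only [pyRange_nonpos_nil (month - 1) (by omega), List.foldl_nil, if_pos hm, ite_self]
  · have h1 : 1 ≤ month := by omega
    by_cases hy : PySem.Int.mod year 4 = 0 <;>
      simp only [if_pos, hy, hm, if_false,
        loop_eq_prefix_ly month h1 hpre, loop_eq_prefix_nly month h1 hpre]
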